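-- pv_equiv track=rewrite | github.com/jordimas/que-es-cou | telegram.py | split_html
-- ===== SOURCE A (Python) =====
-- def split_html(html: str, limit: int = 4096) -> list[str]:
--     """
--     Splits HTML into chunks that fit within Telegram's limit.
--     Tries to break on paragraph/line boundaries to avoid cutting mid-tag.
--     """
--     if len(html) <= limit:
--         return [html]
--
--     chunks = []
--     while html:
--         if len(html) <= limit:
--             chunks.append(html)
--             break
--
--         # Try to find a clean break point within the limit (paragraph, newline)
--         chunk = html[:limit]
--         break_pos = max(
--             chunk.rfind("\n\n"),
--             chunk.rfind("</p>"),
--             chunk.rfind("</li>"),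
--             chunk.rfind("\n"),
--         )
--
--         if break_pos <= 0:
--             # No clean break found — hard cut at limit
--             break_pos = limit
--
--         chunks.append(html[:break_pos].strip())
--         html = html[break_pos:].strip()
--
--     return [c for c in chunks if c]
-- ===== SOURCE B (Python) =====
-- def split_html(html: str, limit: int = 4096) -> list[str]:
--     """Single left-to-right pass over the original string using start/end
--     indices: a backward window scan finds the break point and whitespace is
--     skipped by moving indices; the remainder is never resliced."""
--     n = len(html)
--     if n <= limit:
--         return [html]
--     chunks = []
--     start, end = 0, n
--     while start < end:
--         if end - start <= limit:
--             chunks.append(html[start:end])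
--             break
--         w = start + limit  # window end: current chunk is html[start:w]
--         p = w - 1
--         cut = -1
--         while p > start:
--             if html[p] == '\n' or html.startswith("</p>", p, w) \
--                     or html.startswith("</li>", p, w):
--                 cut = p
--                 break
--             p -= 1
--         if cut == -1:
--             cut = w  # no clean break: hard cut at the limit
--         lo, hi = start, cut
--         while lo < hi and html[lo].isspace():
--             lo += 1
--         while hi > lo and html[hi - 1].isspace():
--             hi -= 1
--         if lo < hi:
--             chunks.append(html[lo:hi])
--         start = cut
--         while start < end and html[start].isspace():
--             start += 1
--         while end > start and html[end - 1].isspace():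
--             end -= 1
--     return chunks
-- ===== Notes on version B (the rewrite author's own statement) =====
-- stated objective: alternative
-- what changed: Instead of reslicing and re-stripping the shrinking remainder string each iteration (and running four rfind scans on a fresh slice), B makes a single left-to-right pass over the original string with start/end indices: one backward scan of the current window finds the break point and whitespace is stripped by moving the indices, so no intermediate strings are built except the output chunks (asymptotically fewer character moves, but interpreted per-character loops trade away CPython's C-level rfind/slice, so it is not measured faster). …
-- outside the precondition, e.g. on split_html('\n\n', -9918): A returns [], B raises IndexError; on split_html('', 0): A returns [''], B returns ['']
import Mathlib
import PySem

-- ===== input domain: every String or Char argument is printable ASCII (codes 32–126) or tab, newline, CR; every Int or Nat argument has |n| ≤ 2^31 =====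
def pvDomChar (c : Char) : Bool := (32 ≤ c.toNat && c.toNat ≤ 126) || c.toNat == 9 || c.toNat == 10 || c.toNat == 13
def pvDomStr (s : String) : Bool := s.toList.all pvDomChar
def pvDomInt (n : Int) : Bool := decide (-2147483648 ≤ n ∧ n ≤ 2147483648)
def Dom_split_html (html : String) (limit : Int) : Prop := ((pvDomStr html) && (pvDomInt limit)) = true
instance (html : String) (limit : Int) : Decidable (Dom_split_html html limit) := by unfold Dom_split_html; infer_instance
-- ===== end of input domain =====

-- B replaces A's repeated reslicing and re-stripping of the remainder by one left-to-right
-- pass over the original string with start/end indices: a single backward window scan finds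
-- the break point and whitespace is skipped by moving indices (an alternative algorithm;
-- not measured faster in CPython, whose built-in rfind/slice run at C speed).

-- ===== PORT A =====
-- A's while-loop as fuel recursion; fuel = len(html)+1 is enough whenever limit ≥ 1
-- (each iteration shortens html by at least one character); for limit ≤ 0 Python A diverges
-- (outside Pre_ below).
def splitALoop (fuel : Nat) (limit : Int) (html : List Char) (chunks : List (List Char)) :
    List (List Char) :=
  match fuel with
  | 0 => chunks
  | fuel + 1 =>
    if html = [] then chunks                    -- while html:
    else if (html.length : Int) ≤ limit then chunks ++ [html]
    else
      let chunk := PySem.List.slice html none (some limit)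
      let bp := max (max (max (PySem.Chars.rfind chunk ['\n', '\n'])
                              (PySem.Chars.rfind chunk ['<', '/', 'p', '>']))
                         (PySem.Chars.rfind chunk ['<', '/', 'l', 'i', '>']))
                    (PySem.Chars.rfind chunk ['\n'])
      let bp := if bp ≤ 0 then limit else bp
      splitALoop fuel limit (PySem.Chars.strip (PySem.List.slice html (some bp) none))
        (chunks ++ [PySem.Chars.strip (PySem.List.slice html none (some bp))])

def split_html (html : String) (limit : Int) : List String :=
  if (html.toList.length : Int) ≤ limit then [html]
  else
    ((splitALoop (html.toList.length + 1) limit html.toList []).filter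
        (fun c => decide (c ≠ []))).map (fun c => String.ofList c)

-- ===== PORT B =====
-- html.startswith(pat, p, w): exact for 0 ≤ p and w ≤ len(html) (the only way B calls it).
def swAt (l : List Char) (pat : List Char) (p w : Nat) : Bool :=
  decide (p + pat.length ≤ w) && pat.isPrefixOf (l.drop p)

-- the inner backward window scan (B only calls it with p < w ≤ len l, so getD is html[p])
def bScan (l : List Char) (start w : Nat) (p : Nat) : Int :=
  if _h : start < p then
    if l.getD p ' ' == '\n' || swAt l ['<', '/', 'p', '>'] p w
        || swAt l ['<', '/', 'l', 'i', '>'] p w then (p : Int)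
    else bScan l start w (p - 1)
  else -1
termination_by p
decreasing_by omega

-- while lo < hi and html[lo].isspace(): lo += 1
def skipF (l : List Char) (lo hi : Nat) : Nat :=
  if _h : lo < hi ∧ PySem.Chars.isspace (l.getD lo ' ') = true then skipF l (lo + 1) hi else lo
termination_by hi - lo
decreasing_by omega

-- while hi > lo and html[hi-1].isspace(): hi -= 1
def skipB (l : List Char) (lo hi : Nat) : Nat :=
  if _h : lo < hi ∧ PySem.Chars.isspace (l.getD (hi - 1) ' ') = true then skipB l lo (hi - 1)
  else hi
termination_by hi
decreasing_by omega

def splitBLoop (fuel : Nat) (l : List Char) (limit : Int) (start e : Nat)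
    (chunks : List (List Char)) : List (List Char) :=
  match fuel with
  | 0 => chunks
  | fuel + 1 =>
    if start < e then
      if ((e - start : Nat) : Int) ≤ limit then chunks ++ [(l.drop start).take (e - start)]
      else
        let w := start + limit.toNat
        let cut := bScan l start w (w - 1)
        let c := if cut = -1 then w else cut.toNat
        let lo := skipF l start c
        let hi := skipB l lo c
        let chunks' := if lo < hi then chunks ++ [(l.drop lo).take (hi - lo)] else chunks
        let start' := skipF l c e
        let e' := skipB l start' e
        splitBLoop fuel l limit start' e' chunks'
    else chunks

def split_html_alt (html : String) (limit : Int) : List String :=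
  let l := html.toList
  if (l.length : Int) ≤ limit then [html]
  else (splitBLoop (l.length + 1) l limit 0 l.length []).map (fun c => String.ofList c)

-- ===== PRECONDITION & SPEC =====
-- Pre_ excludes limit ≤ 0 only: there Python A loops forever on all but degenerate (empty or
-- all-whitespace) strings, whose negative-slice corner values B's index arithmetic does not
-- reproduce (B raises or loops there).
def Pre_split_html (html : String) (limit : Int) : Prop := 1 ≤ limit
instance (html : String) (limit : Int) : Decidable (Pre_split_html html limit) := by
  unfold Pre_split_html; infer_instance

def pvWitness_split_html : String × Int := ("a\nb c", 3)

def Spec_split_html (html : String) (limit : Int) (out : List String) : Prop :=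
  out = split_html_alt html limit
instance (html : String) (limit : Int) (out : List String) :
    Decidable (Spec_split_html html limit out) := by unfold Spec_split_html; infer_instance

-- ===== CLAIM (what is proved, stated in full; the proofs are below) =====
def Claim_equal_split_html : Prop := ∀ (html : String) (limit : Int),
  Dom_split_html html limit → Pre_split_html html limit →
    Spec_split_html html limit (split_html html limit)

-- ===== LEMMAS AND PROOFS =====

-- generic downward scan: shape of PySem.Chars.rfind.go on an arbitrary predicate
def gscan (P : Nat → Bool) : Nat → Int
  | 0 => if P 0 then 0 else -1
  | j + 1 => if P (j + 1) then (j : Int) + 1 else gscan P j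

theorem rfindGo_eq_gscan (s sub : List Char) (k : Nat) :
    PySem.Chars.rfind.go s sub k = gscan (fun j => sub.isPrefixOf (s.drop j)) k := by
  induction k with
  | zero => simp [PySem.Chars.rfind.go, gscan]
  | succ j ih => simp [PySem.Chars.rfind.go, gscan, ih]

theorem gscan_le (P : Nat → Bool) (k : Nat) : gscan P k ≤ (k : Int) := by
  induction k with
  | zero => unfold gscan; split <;> omega
  | succ j ih => unfold gscan; split <;> [omega; (push_cast; omega)]

theorem gscan_or (P Q : Nat → Bool) (k : Nat) :
    gscan (fun j => P j || Q j) k = max (gscan P k) (gscan Q k) := by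
  induction k with
  | zero => unfold gscan; by_cases hP : P 0 <;> by_cases hQ : Q 0 <;> simp [hP, hQ]
  | succ j ih =>
    have hP' := gscan_le P j
    have hQ' := gscan_le Q j
    unfold gscan
    by_cases hP : P (j + 1) <;> by_cases hQ : Q (j + 1) <;> simp [hP, hQ, ih] <;> omega

theorem gscan_congr (P Q : Nat → Bool) (k : Nat) (h : ∀ j ≤ k, P j = Q j) :
    gscan P k = gscan Q k := by
  induction k with
  | zero => unfold gscan; rw [h 0 (by omega)]
  | succ j ih =>
    unfold gscan; rw [h (j + 1) (by omega), ih (fun i hi => h i (by omega))]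

-- bScan in terms of gscan of the accept predicate
def acceptB (l : List Char) (w p : Nat) : Bool :=
  l.getD p ' ' == '\n' || swAt l ['<', '/', 'p', '>'] p w || swAt l ['<', '/', 'l', 'i', '>'] p w

theorem bScan_eq_gscan (l : List Char) (s w : Nat) :
    ∀ p, s ≤ p →
      bScan l s w p =
        if gscan (fun j => acceptB l w (s + j)) (p - s) ≤ 0 then -1
        else (s : Int) + gscan (fun j => acceptB l w (s + j)) (p - s) := by
  intro p
  induction p using Nat.strong_induction_on with
  | _ p ih =>
    intro hsp
    rw [bScan]
    by_cases hlt : s < p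
    · rw [dif_pos hlt, show p - s = (p - 1 - s) + 1 by omega]
      have hPtop : acceptB l w (s + (p - 1 - s + 1)) = acceptB l w p := by
        congr 1; omega
      by_cases hacc : (l.getD p ' ' == '\n' || swAt l ['<', '/', 'p', '>'] p w
          || swAt l ['<', '/', 'l', 'i', '>'] p w) = true
      · have hacc' : acceptB l w (s + (p - 1 - s + 1)) = true := by
          rw [hPtop]; exact hacc
        rw [if_pos hacc]
        simp only [gscan, hacc', if_true]
        have : ¬ ((p - 1 - s : Nat) : Int) + 1 ≤ 0 := by omega
        rw [if_neg this]
        omega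
      · have hacc' : acceptB l w (s + (p - 1 - s + 1)) = false := by
          rw [hPtop]; exact Bool.not_eq_true _ ▸ Bool.eq_false_iff.mpr hacc
        rw [if_neg hacc]
        simp only [gscan, hacc', Bool.false_eq_true, if_false]
        exact ih (p - 1) (by omega) (by omega)
    · rw [dif_neg hlt]
      have hps : p = s := by omega
      subst hps
      simp only [Nat.sub_self, gscan]
      split <;> simp

-- slice decompositions
theorem slice_cons (l : List Char) (lo hi : Nat) (h1 : lo < hi) (h2 : hi ≤ l.length) :
    (l.drop lo).take (hi - lo) =
      l.getD lo ' ' :: (l.drop (lo + 1)).take (hi - (lo + 1)) := by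
  rw [List.drop_eq_getElem_cons (show lo < l.length by omega),
      List.getD_eq_getElem l ' ' (show lo < l.length by omega),
      show hi - lo = (hi - (lo + 1)) + 1 by omega, List.take_succ_cons]

theorem slice_snoc (l : List Char) (lo hi : Nat) (h1 : lo < hi) (h2 : hi ≤ l.length) :
    (l.drop lo).take (hi - lo) =
      (l.drop lo).take (hi - 1 - lo) ++ [l.getD (hi - 1) ' '] := by
  rw [show hi - lo = (hi - 1 - lo) + 1 by omega, List.take_add_one]
  have h : (l.drop lo)[hi - 1 - lo]? = some (l.getD (hi - 1) ' ') := by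
    rw [List.getElem?_drop, show lo + (hi - 1 - lo) = hi - 1 by omega,
        List.getElem?_eq_getElem (show hi - 1 < l.length by omega),
        List.getD_eq_getElem l ' ' (show hi - 1 < l.length by omega)]
  simp [h]

-- skip bounds
theorem skipF_bounds (l : List Char) (lo hi : Nat) (h : lo ≤ hi) :
    lo ≤ skipF l lo hi ∧ skipF l lo hi ≤ hi := by
  fun_induction skipF l lo hi with
  | case1 lo hcond ih => have := ih (by omega); omega
  | case2 lo hcond => omega

theorem skipB_bounds (l : List Char) (lo hi : Nat) (h : lo ≤ hi) :
    lo ≤ skipB l lo hi ∧ skipB l lo hi ≤ hi := by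
  fun_induction skipB l lo hi with
  | case1 hi hcond ih => have := ih (by omega); omega
  | case2 hi hcond => omega

-- strips as index moves
theorem lstrip_slice (l : List Char) (lo hi : Nat) (h1 : lo ≤ hi) (h2 : hi ≤ l.length) :
    PySem.Chars.lstrip ((l.drop lo).take (hi - lo)) =
      (l.drop (skipF l lo hi)).take (hi - skipF l lo hi) := by
  fun_induction skipF l lo hi with
  | case1 lo hcond ih =>
    rw [slice_cons l lo hi hcond.1 h2]
    simp only [PySem.Chars.lstrip, List.dropWhile_cons, hcond.2, if_true]
    exact ih (by omega)
  | case2 lo hcond =>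
    by_cases hlt : lo < hi
    · have hsp : PySem.Chars.isspace (l.getD lo ' ') = false := by
        cases hx : PySem.Chars.isspace (l.getD lo ' ') with
        | false => rfl
        | true => exact absurd ⟨hlt, hx⟩ hcond
      conv_lhs => rw [slice_cons l lo hi hlt h2]
      simp only [PySem.Chars.lstrip, List.dropWhile_cons, hsp, Bool.false_eq_true,
        if_false]
      exact (slice_cons l lo hi hlt h2).symm
    · have h0 : hi - lo = 0 := by omega
      simp [h0, PySem.Chars.lstrip]

theorem rstrip_slice (l : List Char) (lo hi : Nat) (h1 : lo ≤ hi) (h2 : hi ≤ l.length) :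
    PySem.Chars.rstrip ((l.drop lo).take (hi - lo)) =
      (l.drop lo).take (skipB l lo hi - lo) := by
  fun_induction skipB l lo hi with
  | case1 hi hcond ih =>
    rw [slice_snoc l lo hi hcond.1 h2]
    simp only [PySem.Chars.rstrip, List.reverse_append, List.reverse_cons,
      List.reverse_nil, List.nil_append, List.cons_append, List.dropWhile_cons,
      hcond.2, if_true]
    have := ih (by omega) (by omega)
    simpa only [PySem.Chars.rstrip] using this
  | case2 hi hcond =>
    by_cases hlt : lo < hi
    · have hsp : PySem.Chars.isspace (l.getD (hi - 1) ' ') = false := by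
        cases hx : PySem.Chars.isspace (l.getD (hi - 1) ' ') with
        | false => rfl
        | true => exact absurd ⟨hlt, hx⟩ hcond
      conv_lhs => rw [slice_snoc l lo hi hlt h2]
      simp only [PySem.Chars.rstrip, List.reverse_append, List.reverse_cons,
        List.reverse_nil, List.nil_append, List.cons_append, List.dropWhile_cons,
        hsp, Bool.false_eq_true, if_false, List.reverse_cons, List.reverse_reverse]
      exact (slice_snoc l lo hi hlt h2).symm
    · have h0 : hi - lo = 0 := by omega
      simp [h0, PySem.Chars.rstrip]

theorem strip_slice (l : List Char) (lo hi : Nat) (h1 : lo ≤ hi) (h2 : hi ≤ l.length) :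
    PySem.Chars.strip ((l.drop lo).take (hi - lo)) =
      (l.drop (skipF l lo hi)).take (skipB l (skipF l lo hi) hi - skipF l lo hi) := by
  have hb := skipF_bounds l lo hi h1
  rw [PySem.Chars.strip, lstrip_slice l lo hi h1 h2, rstrip_slice l _ hi hb.2 h2]

-- the pointwise bridge: A's four patterns on chunk.drop j equal B's accept test at s+j
theorem pointwise (l : List Char) (s L j : Nat) (hj : j < L) (hlen : s + L ≤ l.length) :
    ((((['\n', '\n'].isPrefixOf (((l.drop s).take L).drop j) ||
        ['<', '/', 'p', '>'].isPrefixOf (((l.drop s).take L).drop j)) ||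
        ['<', '/', 'l', 'i', '>'].isPrefixOf (((l.drop s).take L).drop j)) ||
        ['\n'].isPrefixOf (((l.drop s).take L).drop j))) =
      acceptB l (s + L) (s + j) := by
  have hsl : s + j < l.length := by omega
  have hdj : ((l.drop s).take L).drop j = (l.drop (s + j)).take (L - j) := by
    rw [List.drop_take, List.drop_drop]
  have key : ∀ (pat : List Char),
      pat.isPrefixOf (((l.drop s).take L).drop j) =
        (decide (j + pat.length ≤ L) && pat.isPrefixOf (l.drop (s + j))) := by
    intro pat
    rw [hdj, Bool.eq_iff_iff]
    simp only [List.isPrefixOf_iff_prefix, List.prefix_take_iff, Bool.and_eq_true,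
      decide_eq_true_eq]
    constructor
    · rintro ⟨ha, hb⟩; exact ⟨by omega, ha⟩
    · rintro ⟨ha, hb⟩; exact ⟨hb, by omega⟩
  have hcons := List.drop_eq_getElem_cons hsl
  have hgetD : l.getD (s + j) ' ' = l[s + j] := List.getD_eq_getElem l ' ' hsl
  have hnl : (['\n'].isPrefixOf (l.drop (s + j))) = (l.getD (s + j) ' ' == '\n') := by
    rw [hcons, hgetD, Bool.eq_iff_iff]
    simp only [List.isPrefixOf, Bool.and_true, beq_iff_eq]
    exact eq_comm
  have hnlnl_imp : ['\n', '\n'].isPrefixOf (l.drop (s + j)) = true →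
      (l.getD (s + j) ' ' == '\n') = true := by
    rw [hcons, hgetD]
    simp only [List.isPrefixOf, Bool.and_eq_true, beq_iff_eq]
    rintro ⟨ha, -⟩
    simp [← ha]
  have hj1 : decide (j + (['\n'] : List Char).length ≤ L) = true := by
    simp only [List.length_cons, List.length_nil, decide_eq_true_eq]; omega
  rw [key, key, key, key, hnl]
  unfold acceptB swAt
  have hd4 : decide (s + j + (['<', '/', 'p', '>'] : List Char).length ≤ s + L)
      = decide (j + (['<', '/', 'p', '>'] : List Char).length ≤ L) := by
    simp only [decide_eq_decide]; omega
  have hd5 : decide (s + j + (['<', '/', 'l', 'i', '>'] : List Char).length ≤ s + L)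
      = decide (j + (['<', '/', 'l', 'i', '>'] : List Char).length ≤ L) := by
    simp only [decide_eq_decide]; omega
  rw [hd4, hd5, hj1]
  by_cases hc : (l.getD (s + j) ' ' == '\n') = true
  · rw [hc]; simp
  · have hnn : ['\n', '\n'].isPrefixOf (l.drop (s + j)) = false := by
      cases hx : ['\n', '\n'].isPrefixOf (l.drop (s + j)) with
      | false => rfl
      | true => exact absurd (hnlnl_imp hx) hc
    rw [Bool.not_eq_true] at hc
    rw [hc, hnn]
    simp

theorem gscan_top_false (P : Nat → Bool) (k : Nat) (h : P (k + 1) = false) :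
    gscan P (k + 1) = gscan P k := by
  simp [gscan, h]

theorem gscan_shift (P : Nat → Bool) (L : Nat) (hL : 1 ≤ L) (h : P L = false) :
    gscan P L = gscan P (L - 1) := by
  conv_lhs => rw [show L = L - 1 + 1 by omega]
  exact gscan_top_false P (L - 1) (by rw [show L - 1 + 1 = L by omega]; exact h)

theorem rfind_le_length (s sub : List Char) :
    PySem.Chars.rfind s sub ≤ (s.length : Int) := by
  simp only [PySem.Chars.rfind]
  rw [rfindGo_eq_gscan]
  exact gscan_le _ _

-- A's break-point expression equals B's scan result, packaged for the main induction
theorem break_eq (l : List Char) (s : Nat) (L : Nat) (hL : 1 ≤ L) (hlen : s + L ≤ l.length)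
    (bp : Int)
    (hbp : bp = max (max (max (PySem.Chars.rfind ((l.drop s).take L) ['\n', '\n'])
                            (PySem.Chars.rfind ((l.drop s).take L) ['<', '/', 'p', '>']))
                       (PySem.Chars.rfind ((l.drop s).take L) ['<', '/', 'l', 'i', '>']))
                  (PySem.Chars.rfind ((l.drop s).take L) ['\n'])) :
    bScan l s (s + L) (s + L - 1) = if bp ≤ 0 then -1 else (s : Int) + bp := by
  have hcl : ((l.drop s).take L).length = L := by simp; omega
  have hdropL : ((l.drop s).take L).drop L = [] := by
    have h := List.drop_length (l := (l.drop s).take L)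
    rw [hcl] at h; exact h
  have hr : ∀ sub : List Char, PySem.Chars.rfind ((l.drop s).take L) sub =
      gscan (fun j => sub.isPrefixOf (((l.drop s).take L).drop j)) L := by
    intro sub
    simp only [PySem.Chars.rfind, hcl]
    exact rfindGo_eq_gscan _ _ _
  rw [hr, hr, hr, hr] at hbp
  simp only [← gscan_or] at hbp
  rw [gscan_shift _ L hL (by simp only [hdropL]; rfl)] at hbp
  rw [gscan_congr _ _ _
      (fun j (hj : j ≤ L - 1) => pointwise l s L j (by omega) hlen)] at hbp
  rw [bScan_eq_gscan l s (s + L) (s + L - 1) (by omega),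
      show s + L - 1 - s = L - 1 by omega, ← hbp]

-- the main lockstep invariant
theorem loop_eq (l : List Char) (limit : Int) (hlim : 1 ≤ limit) :
    ∀ (fuel : Nat) (s e : Nat) (accA accB : List (List Char)),
      s ≤ e → e ≤ l.length → accB = accA.filter (fun c => decide (c ≠ [])) →
      splitBLoop fuel l limit s e accB =
        (splitALoop fuel limit ((l.drop s).take (e - s)) accA).filter (fun c => decide (c ≠ [])) := by
  intro fuel
  induction fuel with
  | zero => intro s e accA accB hse hel hacc; simp [splitALoop, splitBLoop, hacc]
  | succ fuel ih =>
    intro s e accA accB hse hel hacc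
    by_cases hlt : s < e
    · have hXlen : ((l.drop s).take (e - s)).length = e - s := by simp; omega
      have hXne : (l.drop s).take (e - s) ≠ [] := by
        intro h0; rw [h0] at hXlen; simp at hXlen; omega
      rw [splitALoop, splitBLoop, if_neg hXne, if_pos hlt]
      by_cases hsmall : ((e - s : Nat) : Int) ≤ limit
      · have hsmall' : (((l.drop s).take (e - s)).length : Int) ≤ limit := by
          rw [hXlen]; exact hsmall
        rw [if_pos hsmall', if_pos hsmall, hacc, List.filter_append]
        simp [hXne]
      · have hsmall' : ¬ (((l.drop s).take (e - s)).length : Int) ≤ limit := by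
          rw [hXlen]; exact hsmall
        rw [if_neg hsmall', if_neg hsmall]
        dsimp only []
        -- abbreviations
        set L := limit.toNat with hLdef
        have hL1 : 1 ≤ L := by omega
        have hLlim : (L : Int) = limit := by omega
        have heL : s + L < e := by omega
        have hwlen : s + L ≤ l.length := by omega
        -- A's chunk is the L-window of the original
        have hchunk : PySem.List.slice ((l.drop s).take (e - s)) none (some limit) =
            (l.drop s).take L := by
          rw [PySem.List.slice_to _ (by omega : (0:Int) ≤ limit), List.take_take]
          congr 1; omega
        -- A's break position vs B's scan
        have hbscan := break_eq l s L hL1 hwlen _ rfl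
        rw [hchunk]
        -- names for the break positions
        set bp := max (max (max (PySem.Chars.rfind ((l.drop s).take L) ['\n', '\n'])
                            (PySem.Chars.rfind ((l.drop s).take L) ['<', '/', 'p', '>']))
                       (PySem.Chars.rfind ((l.drop s).take L) ['<', '/', 'l', 'i', '>']))
                  (PySem.Chars.rfind ((l.drop s).take L) ['\n']) with hbpdef
        have hbpL : bp ≤ (L : Int) := by
          have h1 := rfind_le_length ((l.drop s).take L) ['\n', '\n']
          have h2 := rfind_le_length ((l.drop s).take L) ['<', '/', 'p', '>']
          have h3 := rfind_le_length ((l.drop s).take L) ['<', '/', 'l', 'i', '>']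
          have h4 := rfind_le_length ((l.drop s).take L) ['\n']
          rw [show (((l.drop s).take L).length : Int) = (L : Int) by
            simp; omega] at h1 h2 h3 h4
          rw [hbpdef]; omega
        -- the absolute cut index agrees on both sides
        set bp' : Int := if bp ≤ 0 then limit else bp with hbp'def
        have hbp'pos : 1 ≤ bp' := by rw [hbp'def]; split <;> omega
        have hbp'L : bp' ≤ (L : Int) := by rw [hbp'def]; split <;> omega
        have hcuteq : (if bScan l s (s + L) (s + L - 1) = -1 then s + L
            else (bScan l s (s + L) (s + L - 1)).toNat) = s + bp'.toNat := by
          rw [hbscan, hbp'def]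
          by_cases hble : bp ≤ 0
          · rw [if_pos hble, if_pos hble, if_pos rfl]
          · rw [if_neg hble, if_neg hble, if_neg (by omega)]; omega
        set c := s + bp'.toNat with hcdef
        have hsc : s ≤ c := by omega
        have hcw : c ≤ s + L := by omega
        have hce : c ≤ e := by omega
        have hclen : c ≤ l.length := by omega
        -- A's appended chunk is B's index-stripped window
        have htakebp : PySem.List.slice ((l.drop s).take (e - s)) none (some bp') =
            (l.drop s).take (c - s) := by
          rw [PySem.List.slice_to _ (by omega : (0:Int) ≤ bp'), List.take_take]
          congr 1; omega
        have hdropbp : PySem.List.slice ((l.drop s).take (e - s)) (some bp') none =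
            (l.drop c).take (e - c) := by
          rw [PySem.List.slice_from _ (by omega : (0:Int) ≤ bp'), List.drop_take,
            List.drop_drop]
          congr 1; omega
        have hstrip1 : PySem.Chars.strip (PySem.List.slice ((l.drop s).take (e - s)) none (some bp')) =
            (l.drop (skipF l s c)).take (skipB l (skipF l s c) c - skipF l s c) := by
          rw [htakebp, show (c - s : Nat) = c - s by rfl]
          have := strip_slice l s c hsc hclen
          exact this
        have hstrip2 : PySem.Chars.strip (PySem.List.slice ((l.drop s).take (e - s)) (some bp') none) =
            (l.drop (skipF l c e)).take (skipB l (skipF l c e) e - skipF l c e) := by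
          rw [hdropbp]
          exact strip_slice l c e hce hel
        rw [hstrip1, hstrip2, hcuteq]
        -- bounds for the new indices
        have hF1 := skipF_bounds l s c hsc
        have hB1 := skipB_bounds l (skipF l s c) c hF1.2
        have hF2 := skipF_bounds l c e hce
        have hB2 := skipB_bounds l (skipF l c e) e hF2.2
        -- the filtered accumulator stays in sync
        have haccnew : (if skipF l s c < skipB l (skipF l s c) c then
              accB ++ [(l.drop (skipF l s c)).take (skipB l (skipF l s c) c - skipF l s c)]
            else accB) =
            (accA ++ [(l.drop (skipF l s c)).take (skipB l (skipF l s c) c - skipF l s c)]).filter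
              (fun c => decide (c ≠ [])) := by
          rw [List.filter_append, hacc]
          by_cases hlh : skipF l s c < skipB l (skipF l s c) c
          · have hne : (l.drop (skipF l s c)).take (skipB l (skipF l s c) c - skipF l s c) ≠ [] := by
              intro h0
              have : ((l.drop (skipF l s c)).take (skipB l (skipF l s c) c - skipF l s c)).length = 0 := by
                rw [h0]; rfl
              simp at this
              omega
            rw [if_pos hlh]
            simp [hne]
          · have hemp : (l.drop (skipF l s c)).take (skipB l (skipF l s c) c - skipF l s c) = [] := by
              have h0 : skipB l (skipF l s c) c - skipF l s c = 0 := by omega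
              rw [h0, List.take_zero]
            rw [if_neg hlh]
            simp [hemp]
        rw [haccnew]
        exact ih (skipF l c e) (skipB l (skipF l c e) e) _ _ (by omega) (by omega) rfl
    · have hse' : s = e := by omega
      subst hse'
      rw [splitALoop, splitBLoop, if_neg (lt_irrefl s)]
      simp [hacc]

-- ===== VERDICT (by name: the statement is the Claim_ definition above) =====
theorem split_html_spec : Claim_equal_split_html := by
  intro html limit _hdom hpre
  have hlim : 1 ≤ limit := hpre
  unfold Spec_split_html split_html split_html_alt
  dsimp only []
  by_cases hsm : ((html.toList.length : Int) ≤ limit)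
  · rw [if_pos hsm, if_pos hsm]
  · rw [if_neg hsm, if_neg hsm]
    have h := loop_eq html.toList limit hlim (html.toList.length + 1) 0
      html.toList.length [] [] (by omega) (le_refl _) rfl
    rw [List.drop_zero, Nat.sub_zero, List.take_length] at h
    rw [h]
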